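-- pv_equiv track=rewrite | github.com/dhawan98/TradeBruv | tradebruv/daily_decision.py | _overall_provider_health
-- ===== SOURCE A (Python) =====
-- from typing import Any
--
-- def _overall_provider_health(rows: list[dict[str, Any]]) -> dict[str, Any]:
--     if not rows:
--         return {"provider": "unavailable", "status": "healthy", "message": ""}
--     for status in ("rate_limited", "unauthorized", "unavailable", "degraded"):
--         match = next((row for row in rows if row.get("status") == status), None)
--         if match:
--             return match
--     return rows[0]
-- ===== SOURCE B (Python) =====
-- from typing import Any
--
-- _PRIORITY = {"rate_limited": 0, "unauthorized": 1, "unavailable": 2, "degraded": 3}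
--
-- def _overall_provider_health(rows: list[dict[str, Any]]) -> dict[str, Any]:
--     if not rows:
--         return {"provider": "unavailable", "status": "healthy", "message": ""}
--     best_row = rows[0]
--     best_rank = _PRIORITY.get(best_row.get("status"), 4)
--     for row in rows:
--         rank = _PRIORITY.get(row.get("status"), 4)
--         if rank < best_rank:
--             best_row, best_rank = row, rank
--     return best_row
-- ===== Notes on version B (the rewrite author's own statement) =====
-- stated objective: alternative
-- what changed: Replaced the per-status rescans (one next(...) pass over rows for each of the four statuses) by a single pass that tracks the best (lowest-rank) row under a priority-rank dict, with strict less-than so the first occurrence of the highest-priority status still wins.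
import Mathlib
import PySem

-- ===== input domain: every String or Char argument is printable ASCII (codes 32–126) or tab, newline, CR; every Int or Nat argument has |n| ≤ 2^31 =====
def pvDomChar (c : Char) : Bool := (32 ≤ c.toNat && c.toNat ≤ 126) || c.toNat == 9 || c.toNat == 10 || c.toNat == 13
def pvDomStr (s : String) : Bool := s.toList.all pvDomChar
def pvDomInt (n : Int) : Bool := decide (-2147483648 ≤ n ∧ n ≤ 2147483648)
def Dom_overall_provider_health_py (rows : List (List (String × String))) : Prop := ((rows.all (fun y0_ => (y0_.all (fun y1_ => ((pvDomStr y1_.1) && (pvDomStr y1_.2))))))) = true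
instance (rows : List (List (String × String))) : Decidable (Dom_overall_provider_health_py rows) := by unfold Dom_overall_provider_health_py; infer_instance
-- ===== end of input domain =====

-- B replaces A's four sequential next(...) scans over rows (one per status) by a single
-- pass tracking the lowest-rank row under a priority-rank dict; objective: alternative.

-- dict.get(k): first-match lookup in the association list (shared primitive of both ports)
def pvGet (row : List (String × String)) (k : String) : Option String :=
  (row.find? (fun p => p.1 == k)).map Prod.snd

-- ===== PORT A =====
-- next((row for row in rows if row.get("status") == status), None)
def pyAFind (rows : List (List (String × String))) (s : String) : Option (List (String × String)) :=
  rows.find? (fun row => pvGet row "status" == some s)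

-- the 'for status in (...)' loop with its early returns; falls through to rows[0]
def pyALoop (rows : List (List (String × String))) : List String → List (String × String)
  | [] => rows.headD []
  | s :: rest =>
    match pyAFind rows s with
    | some m => if m.isEmpty then pyALoop rows rest else m   -- 'if match:' (an empty dict is falsy)
    | none => pyALoop rows rest

def overall_provider_health_py (rows : List (List (String × String))) : List (String × String) :=
  if rows.isEmpty then [("provider", "unavailable"), ("status", "healthy"), ("message", "")]
  else pyALoop rows ["rate_limited", "unauthorized", "unavailable", "degraded"]

-- ===== PORT B =====
def pvPriority : List (String × Int) :=
  [("rate_limited", 0), ("unauthorized", 1), ("unavailable", 2), ("degraded", 3)]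

-- _PRIORITY.get(s, 4)
def pvRankS (s : String) : Int :=
  ((pvPriority.find? (fun p => p.1 == s)).map Prod.snd).getD 4

-- rank = _PRIORITY.get(row.get("status"), 4)
def pvRank (row : List (String × String)) : Int :=
  match pvGet row "status" with
  | some s => pvRankS s
  | none => 4

def overall_provider_health_py_alt (rows : List (List (String × String))) : List (String × String) :=
  match rows with
  | [] => [("provider", "unavailable"), ("status", "healthy"), ("message", "")]
  | r0 :: _ =>
    (rows.foldl
      (fun b row => if pvRank row < b.2 then (row, pvRank row) else b)
      (r0, pvRank r0)).1

-- ===== PRECONDITION & SPEC =====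
def Spec_overall_provider_health_py (rows : List (List (String × String))) (out : List (String × String)) : Prop := out = overall_provider_health_py_alt rows
instance (rows : List (List (String × String))) (out : List (String × String)) : Decidable (Spec_overall_provider_health_py rows out) := by unfold Spec_overall_provider_health_py; infer_instance

-- ===== CLAIM (what is proved, stated in full; the proofs are below) =====
def Claim_equal_overall_provider_health_py : Prop := ∀ (rows : List (List (String × String))), Dom_overall_provider_health_py rows → Spec_overall_provider_health_py rows (overall_provider_health_py rows)

-- ===== LEMMAS AND PROOFS =====

-- first element of the list achieving the minimal rank (right-recursive reference function)
def pvFam : List (List (String × String)) → List (String × String)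
  | [] => []
  | x :: l => if pvRank x ≤ pvRank (pvFam l) then x else pvFam l

theorem pvFam_cons (x : List (String × String)) (l : List (List (String × String))) :
    pvFam (x :: l) = if pvRank x ≤ pvRank (pvFam l) then x else pvFam l := rfl

theorem pvRankS_cases (s : String) :
    (s = "rate_limited" ∧ pvRankS s = 0) ∨ (s = "unauthorized" ∧ pvRankS s = 1) ∨
    (s = "unavailable" ∧ pvRankS s = 2) ∨ (s = "degraded" ∧ pvRankS s = 3) ∨
    (s ≠ "rate_limited" ∧ s ≠ "unauthorized" ∧ s ≠ "unavailable" ∧ s ≠ "degraded" ∧ pvRankS s = 4) := by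
  by_cases h1 : s = "rate_limited"
  · exact Or.inl ⟨h1, by simp [pvRankS, pvPriority, h1]⟩
  by_cases h2 : s = "unauthorized"
  · exact Or.inr (Or.inl ⟨h2, by simp [pvRankS, pvPriority, h2]⟩)
  by_cases h3 : s = "unavailable"
  · exact Or.inr (Or.inr (Or.inl ⟨h3, by simp [pvRankS, pvPriority, h3]⟩))
  by_cases h4 : s = "degraded"
  · exact Or.inr (Or.inr (Or.inr (Or.inl ⟨h4, by simp [pvRankS, pvPriority, h4]⟩)))
  · refine Or.inr (Or.inr (Or.inr (Or.inr ⟨h1, h2, h3, h4, ?_⟩)))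
    have e1 : (("rate_limited" : String) == s) = false := beq_eq_false_iff_ne.mpr (Ne.symm h1)
    have e2 : (("unauthorized" : String) == s) = false := beq_eq_false_iff_ne.mpr (Ne.symm h2)
    have e3 : (("unavailable" : String) == s) = false := beq_eq_false_iff_ne.mpr (Ne.symm h3)
    have e4 : (("degraded" : String) == s) = false := beq_eq_false_iff_ne.mpr (Ne.symm h4)
    simp [pvRankS, pvPriority, List.find?, e1, e2, e3, e4]

theorem pvRank_bounds (row : List (String × String)) : 0 ≤ pvRank row ∧ pvRank row ≤ 4 := by
  cases h : pvGet row "status" with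
  | none => simp only [pvRank, h]; omega
  | some s =>
    simp only [pvRank, h]
    rcases pvRankS_cases s with ⟨_, hr⟩ | ⟨_, hr⟩ | ⟨_, hr⟩ | ⟨_, hr⟩ | ⟨_, _, _, _, hr⟩ <;> omega

-- the per-status search predicates of A, rewritten as rank tests
theorem pvRank_status (row : List (String × String)) :
    (pvGet row "status" == some "rate_limited") = (pvRank row == (0 : Int)) ∧
    (pvGet row "status" == some "unauthorized") = (pvRank row == (1 : Int)) ∧
    (pvGet row "status" == some "unavailable") = (pvRank row == (2 : Int)) ∧
    (pvGet row "status" == some "degraded") = (pvRank row == (3 : Int)) := by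
  cases h : pvGet row "status" with
  | none => simp [pvRank, h]
  | some s =>
    simp only [pvRank, h]
    rcases pvRankS_cases s with ⟨hs, hr⟩ | ⟨hs, hr⟩ | ⟨hs, hr⟩ | ⟨hs, hr⟩ | ⟨h1, h2, h3, h4, hr⟩ <;>
      simp_all

theorem pvFam_min : ∀ (l : List (List (String × String))) (x : List (String × String)),
    x ∈ l → pvRank (pvFam l) ≤ pvRank x := by
  intro l
  induction l with
  | nil => intro x hx; cases hx
  | cons y l ih =>
    intro x hx
    rw [pvFam_cons]
    rcases List.mem_cons.mp hx with rfl | hx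
    · split <;> omega
    · have := ih x hx; split <;> omega

theorem pvFam_skip (b x : List (String × String)) (l : List (List (String × String)))
    (h : pvRank b ≤ pvRank x) : pvFam (b :: x :: l) = pvFam (b :: l) := by
  rw [pvFam_cons b (x :: l), pvFam_cons b l]
  by_cases h1 : pvRank x ≤ pvRank (pvFam l)
  · rw [pvFam_cons, if_pos h1, if_pos h, if_pos (le_trans h h1)]
  · rw [pvFam_cons, if_neg h1]

theorem pvRank_nil : pvRank ([] : List (String × String)) = 4 := by
  simp [pvRank, pvGet]

theorem pvFold_eq_fam : ∀ (l : List (List (String × String))) (b : List (String × String)),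
    (l.foldl (fun c row => if pvRank row < c.2 then (row, pvRank row) else c) (b, pvRank b)).1
      = pvFam (b :: l) := by
  intro l
  induction l with
  | nil =>
    intro b
    have hb := (pvRank_bounds b).2
    have h4 : pvRank (pvFam []) = 4 := by simp [pvFam, pvRank_nil]
    simp only [List.foldl_nil]
    rw [pvFam_cons, if_pos (by omega)]
  | cons x l ih =>
    intro b
    simp only [List.foldl_cons]
    by_cases h : pvRank x < pvRank b
    · rw [if_pos h, ih x]
      have hmin : pvRank (pvFam (x :: l)) ≤ pvRank x := pvFam_min _ x (by simp)
      rw [pvFam_cons b (x :: l), if_neg (by omega)]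
    · rw [if_neg h, ih b, pvFam_skip b x l (by omega)]

theorem pvFind_first : ∀ (l : List (List (String × String))), l ≠ [] →
    l.find? (fun row => pvRank row == pvRank (pvFam l)) = some (pvFam l) := by
  intro l
  induction l with
  | nil => intro h; exact absurd rfl h
  | cons x l ih =>
    intro _
    by_cases h : pvRank x ≤ pvRank (pvFam l)
    · rw [pvFam_cons, if_pos h]
      simp [List.find?]
    · rw [pvFam_cons, if_neg h]
      cases l with
      | nil =>
        exfalso
        apply h
        have h4 : pvRank (pvFam []) = 4 := by simp [pvFam, pvRank_nil]
        rw [h4]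
        exact (pvRank_bounds x).2
      | cons y l' =>
        rw [List.find?]
        have hf : (pvRank x == pvRank (pvFam (y :: l'))) = false := by
          simp only [beq_eq_false_iff_ne, ne_eq]; omega
        rw [hf]
        exact ih (by simp)

theorem pvFind_none (l : List (List (String × String))) (k : Int)
    (h : ∀ x ∈ l, k < pvRank x) :
    l.find? (fun row => pvRank row == k) = none := by
  rw [List.find?_eq_none]
  intro x hx
  have := h x hx
  simp only [beq_iff_eq]
  omega

-- found rows are non-empty dicts (their "status" lookup succeeded)
theorem pvRank_ne_nil (m : List (String × String)) (h : pvRank m ≤ 3) : m.isEmpty = false := by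
  cases m with
  | nil => rw [pvRank_nil] at h; omega
  | cons p r => rfl

theorem pyALoop_eq_fam (rows : List (List (String × String))) (hne : rows ≠ []) :
    pyALoop rows ["rate_limited", "unauthorized", "unavailable", "degraded"] = pvFam rows := by
  have e0 : (fun row => pvGet row "status" == some "rate_limited")
      = (fun row => pvRank row == (0 : Int)) := funext fun row => (pvRank_status row).1
  have e1 : (fun row => pvGet row "status" == some "unauthorized")
      = (fun row => pvRank row == (1 : Int)) := funext fun row => (pvRank_status row).2.1
  have e2 : (fun row => pvGet row "status" == some "unavailable")
      = (fun row => pvRank row == (2 : Int)) := funext fun row => (pvRank_status row).2.2.1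
  have e3 : (fun row => pvGet row "status" == some "degraded")
      = (fun row => pvRank row == (3 : Int)) := funext fun row => (pvRank_status row).2.2.2
  have hb := pvRank_bounds (pvFam rows)
  have hfirst := pvFind_first rows hne
  have hnone : ∀ k : Int, k < pvRank (pvFam rows) →
      rows.find? (fun row => pvRank row == k) = none :=
    fun k hk => pvFind_none rows k (fun x hx => lt_of_lt_of_le hk (pvFam_min rows x hx))
  have hcase : pvRank (pvFam rows) = 0 ∨ pvRank (pvFam rows) = 1 ∨ pvRank (pvFam rows) = 2 ∨
      pvRank (pvFam rows) = 3 ∨ pvRank (pvFam rows) = 4 := by omega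
  simp only [pyALoop, pyAFind, e0, e1, e2, e3]
  rcases hcase with h | h | h | h | h
  · rw [h] at hfirst
    simp [hfirst, pvRank_ne_nil (pvFam rows) (by omega)]
  · rw [h] at hfirst
    simp [hnone 0 (by omega), hfirst, pvRank_ne_nil (pvFam rows) (by omega)]
  · rw [h] at hfirst
    simp [hnone 0 (by omega), hnone 1 (by omega), hfirst,
      pvRank_ne_nil (pvFam rows) (by omega)]
  · rw [h] at hfirst
    simp [hnone 0 (by omega), hnone 1 (by omega), hnone 2 (by omega), hfirst,
      pvRank_ne_nil (pvFam rows) (by omega)]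
  · -- minimal rank 4: no status matches anywhere and the first row is the first arg-min
    simp only [hnone 0 (by omega), hnone 1 (by omega), hnone 2 (by omega), hnone 3 (by omega)]
    cases rows with
    | nil => exact absurd rfl hne
    | cons r0 rest =>
      have hx : pvRank r0 ≤ 4 := (pvRank_bounds r0).2
      by_cases hc : pvRank r0 ≤ pvRank (pvFam rest)
      · rw [pvFam_cons, if_pos hc]; rfl
      · exfalso
        have hfr : pvFam (r0 :: rest) = pvFam rest := by rw [pvFam_cons, if_neg hc]
        rw [hfr] at h
        omega

-- ===== VERDICT (by name: the statement is the Claim_ definition above) =====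
theorem overall_provider_health_py_spec : Claim_equal_overall_provider_health_py := by
  intro rows _
  unfold Spec_overall_provider_health_py
  cases rows with
  | nil => rfl
  | cons r0 rest =>
    have hB : overall_provider_health_py_alt (r0 :: rest) = pvFam (r0 :: rest) := by
      show (List.foldl _ (r0, pvRank r0) (r0 :: rest)).1 = _
      rw [List.foldl_cons, if_neg (by omega)]
      exact pvFold_eq_fam rest r0
    rw [hB]
    show (if (r0 :: rest).isEmpty then _ else pyALoop (r0 :: rest) _) = _
    rw [if_neg (by simp)]
    exact pyALoop_eq_fam (r0 :: rest) (by simp)
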